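-- pv_equiv track=rewrite | github.com/songcelia88/practice-problems | add-to-zero/addtozero.py | add_to_zero
-- ===== SOURCE A (Python) =====
-- def add_to_zero(nums):
--     """Given list of ints, return True if any two nums sum to 0."""
--
--     # first solution with O(n^2) runtime
--     # for num1 in nums:
--     #     for num2 in nums:
--     #         if (num1 + num2) == 0:
--     #             return True
--
--     # return False
--
--     # alternate way that has better runtime
--     num_set = set(nums)
--     if 0 in num_set:
--         return True
--
--     for num in num_set:
--         if -num in num_set:
--             return True
--
--     return False
-- ===== SOURCE B (Python) =====
-- def add_to_zero(nums):
--     """Given list of ints, return True if any two nums sum to 0."""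
--     if 0 in nums:
--         return True
--     s = sorted(nums)
--     left, right = 0, len(s) - 1
--     while left < right:
--         total = s[left] + s[right]
--         if total == 0:
--             return True
--         if total < 0:
--             left += 1
--         else:
--             right -= 1
--     return False
-- ===== Notes on version B (the rewrite author's own statement) =====
-- stated objective: alternative
-- what changed: Replaces A's hash-set negation lookup with a sort followed by a two-pointer scan (after the same 0-membership guard).
import Mathlib
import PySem

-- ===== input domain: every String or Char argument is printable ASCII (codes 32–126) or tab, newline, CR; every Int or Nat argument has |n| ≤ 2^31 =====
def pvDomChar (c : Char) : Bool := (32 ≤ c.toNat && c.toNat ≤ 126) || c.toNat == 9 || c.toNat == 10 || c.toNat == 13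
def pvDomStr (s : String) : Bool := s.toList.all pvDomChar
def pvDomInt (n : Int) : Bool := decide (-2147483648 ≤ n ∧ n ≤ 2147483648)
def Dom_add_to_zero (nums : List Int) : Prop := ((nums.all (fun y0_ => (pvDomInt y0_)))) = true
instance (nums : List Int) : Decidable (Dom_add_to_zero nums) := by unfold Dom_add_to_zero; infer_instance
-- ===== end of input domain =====

-- B replaces A's hash-set negation lookup with a sort-then-two-pointer scan (same 0 guard); alternative structure, not claimed faster.

-- ===== PORT A =====
def add_to_zero (nums : List Int) : Bool :=
  let numSet := PySem.Set.ofList nums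
  if PySem.Set.contains numSet 0 then true
  else
    -- 'for num in num_set: if -num in num_set: return True' then 'return False':
    -- an order-independent any over the set's elements
    numSet.any (fun num => PySem.Set.contains numSet (-num))

-- ===== PORT B =====
-- the while loop of Source B: left/right pointers on the sorted list (indices stay in range in Python; getD 0 is exact there)
def tpLoop (s : List Int) (l r : Nat) : Bool :=
  if l < r then
    let total := s.getD l 0 + s.getD r 0
    if total = 0 then true
    else if total < 0 then tpLoop s (l + 1) r
    else tpLoop s l (r - 1)
  else false
termination_by r - l
decreasing_by all_goals omega

def add_to_zero_alt (nums : List Int) : Bool :=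
  if nums.contains 0 then true
  else
    let s := PySem.List.sorted nums (fun x => x) false
    tpLoop s 0 (s.length - 1)

-- ===== PRECONDITION & SPEC =====
def Spec_add_to_zero (nums : List Int) (out : Bool) : Prop := out = add_to_zero_alt nums
instance (nums : List Int) (out : Bool) : Decidable (Spec_add_to_zero nums out) := by unfold Spec_add_to_zero; infer_instance

-- ===== CLAIM (what is proved, stated in full; the proofs are below) =====
def Claim_equal_add_to_zero : Prop := ∀ (nums : List Int), Dom_add_to_zero nums → Spec_add_to_zero nums (add_to_zero nums)

-- ===== LEMMAS AND PROOFS =====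

theorem A_iff (nums : List Int) : add_to_zero nums = true ↔ ∃ x ∈ nums, -x ∈ nums := by
  unfold add_to_zero
  by_cases h0 : (0 : Int) ∈ nums
  · simp [PySem.Set.mem_ofList, h0]
    exact ⟨0, h0, by simpa using h0⟩
  · simp [PySem.Set.mem_ofList, h0, List.any_eq_true]

theorem getD_mono (s : List Int) (hs : s.Pairwise (· ≤ ·)) {a b : Nat} (hab : a ≤ b)
    (hb : b < s.length) : s.getD a 0 ≤ s.getD b 0 := by
  rcases Nat.lt_or_eq_of_le hab with h | h
  · rw [List.getD_eq_getElem s 0 (by omega), List.getD_eq_getElem s 0 hb]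
    exact List.pairwise_iff_getElem.1 hs a b (by omega) hb h
  · subst h; rfl

theorem tpLoop_sound (s : List Int) (l r : Nat) (hr : r < s.length) :
    tpLoop s l r = true → ∃ i j, i < j ∧ j < s.length ∧ s.getD i 0 + s.getD j 0 = 0 := by
  fun_induction tpLoop s l r with
  | case1 l r hlr total h0 => exact fun _ => ⟨l, r, hlr, hr, h0⟩
  | case2 l r hlr total h0 hneg ih => exact ih hr
  | case3 l r hlr total h0 hneg ih => exact ih (by omega)
  | case4 l r hlr => simp

theorem tpLoop_complete (s : List Int) (hs : s.Pairwise (· ≤ ·)) (l r : Nat)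
    (hr : r < s.length) :
    ∀ i j, l ≤ i → i < j → j ≤ r → s.getD i 0 + s.getD j 0 = 0 →
    tpLoop s l r = true := by
  fun_induction tpLoop s l r with
  | case1 l r hlr total h0 => intro _ _ _ _ _ _; rfl
  | case2 l r hlr total h0 hneg ih =>
    intro i j hli hij hjr hsum
    refine ih hr i j ?_ hij hjr hsum
    rcases Nat.lt_or_eq_of_le hli with h | h
    · omega
    · exfalso
      subst h
      have : s.getD j 0 ≤ s.getD r 0 := getD_mono s hs hjr hr
      omega
  | case3 l r hlr total h0 hneg ih =>
    intro i j hli hij hjr hsum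
    rcases Nat.lt_or_eq_of_le hjr with h | h
    · exact ih (by omega) i j hli hij (by omega) hsum
    · exfalso
      subst h
      have : s.getD l 0 ≤ s.getD i 0 := getD_mono s hs (by omega) (by omega)
      omega
  | case4 l r hlr => intro i j hli hij hjr _; omega

theorem sorted_pw (nums : List Int) :
    (PySem.List.sorted nums (fun x => x) false).Pairwise (· ≤ ·) := by
  simpa using PySem.List.sorted_pairwise (xs := nums) (key := fun x => x)

theorem B_iff (nums : List Int) (h0 : (0 : Int) ∉ nums) :
    add_to_zero_alt nums = true ↔ ∃ x ∈ nums, -x ∈ nums := by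
  have hc : nums.contains 0 = false := by simpa using h0
  unfold add_to_zero_alt
  rw [hc]
  simp only [Bool.false_eq_true, if_false]
  set s := PySem.List.sorted nums (fun x => x) false with hsdef
  have hmem : ∀ x : Int, x ∈ s ↔ x ∈ nums := fun x => PySem.List.mem_sorted nums (fun x => x) false x
  have hpw : s.Pairwise (· ≤ ·) := sorted_pw nums
  constructor
  · intro h
    rcases Nat.eq_zero_or_pos s.length with hlen | hlen
    · exfalso
      rw [hlen] at h
      unfold tpLoop at h
      simp at h
    · obtain ⟨i, j, hij, hjlen, hsum⟩ := tpLoop_sound s 0 (s.length - 1) (by omega) h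
      refine ⟨s.getD i 0, (hmem _).1 ?_, ?_⟩
      · rw [List.getD_eq_getElem s 0 (by omega)]; exact List.getElem_mem _
      · have : -s.getD i 0 = s.getD j 0 := by omega
        rw [this]
        refine (hmem _).1 ?_
        rw [List.getD_eq_getElem s 0 hjlen]; exact List.getElem_mem _
  · rintro ⟨x, hx, hnx⟩
    have hxne : x ≠ -x := by
      intro h; apply h0
      have : x = 0 := by omega
      rwa [this] at hx
    obtain ⟨i, hi, hsi⟩ := List.mem_iff_getElem.1 ((hmem x).2 hx)
    obtain ⟨j, hj, hsj⟩ := List.mem_iff_getElem.1 ((hmem (-x)).2 hnx)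
    have hne : i ≠ j := by
      intro h; subst h; exact hxne (hsi ▸ hsj)
    rcases Nat.lt_or_gt_of_ne hne with h | h
    · refine tpLoop_complete s hpw 0 (s.length - 1) (by omega) i j (by omega) h (by omega) ?_
      rw [List.getD_eq_getElem s 0 hi, List.getD_eq_getElem s 0 hj, hsi, hsj]; omega
    · refine tpLoop_complete s hpw 0 (s.length - 1) (by omega) j i (by omega) h (by omega) ?_
      rw [List.getD_eq_getElem s 0 hi, List.getD_eq_getElem s 0 hj, hsi, hsj]; omega

-- ===== VERDICT (by name: the statement is the Claim_ definition above) =====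
theorem add_to_zero_spec : Claim_equal_add_to_zero := by
  intro nums _
  unfold Spec_add_to_zero
  by_cases h0 : (0 : Int) ∈ nums
  · have ha : add_to_zero nums = true := (A_iff nums).2 ⟨0, h0, by simpa using h0⟩
    have hb : add_to_zero_alt nums = true := by
      have hcc : nums.contains 0 = true := by simpa using h0
      unfold add_to_zero_alt
      rw [hcc]
      rfl
    rw [ha, hb]
  · rw [Bool.eq_iff_iff, A_iff nums, B_iff nums h0]
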